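-- pv_equiv track=rewrite | github.com/chenkianwee/solar_travel_gui | solar_travel_gui/stg_function.py | id_week
-- ===== SOURCE A (Python) =====
-- weekly_hr_list = [168, 336, 504, 672, 840, 1008, 1176, 1344, 1512, 1680, 1848, 2016, 2184, 2352, 2520, 2688,
--                   2856, 3024, 3192, 3360, 3528, 3696, 3864, 4032, 4200, 4368, 4536, 4704, 4872, 5040, 5208,
--                   5376, 5544, 5712, 5880, 6048, 6216, 6384, 6552, 6720, 6888, 7056, 7224, 7392, 7560, 7728,
--                   7896, 8064, 8232, 8400, 8568, 8760]
--
-- def id_week(hour):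
--     for i in range(52):
--         end_hr = weekly_hr_list[i]
--         if i ==0:
--             start_hr = 0
--         else:
--             start_hr = weekly_hr_list[i-1]
--
--         if start_hr <= hour < end_hr:
--             return i
-- ===== SOURCE B (Python) =====
-- def id_week(hour):
--     # Closed form: weeks are 168h each except the last longer one,
--     # so clamp hour // 168 at 51 inside the year, None outside.
--     if 0 <= hour < 8760:
--         return min(hour // 168, 51)
-- ===== Notes on version B (the rewrite author's own statement) =====
-- stated objective: simpler
-- what changed: Replaced the linear scan over the weekly boundary list with a closed-form range guard plus a clamped integer division (the clamp handles the longer final week).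
import Mathlib
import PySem

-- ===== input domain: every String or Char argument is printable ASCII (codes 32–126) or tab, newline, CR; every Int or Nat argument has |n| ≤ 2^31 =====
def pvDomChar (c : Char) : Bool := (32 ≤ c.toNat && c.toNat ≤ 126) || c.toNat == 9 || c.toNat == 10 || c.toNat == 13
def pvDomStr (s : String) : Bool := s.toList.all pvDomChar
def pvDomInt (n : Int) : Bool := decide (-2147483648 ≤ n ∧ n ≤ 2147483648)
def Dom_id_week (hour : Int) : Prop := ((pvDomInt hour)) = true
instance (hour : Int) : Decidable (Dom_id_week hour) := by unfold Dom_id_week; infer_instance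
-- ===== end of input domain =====

-- B: closed-form week index (range guard + clamped division) instead of A's linear scan over the boundary list.
-- ===== PORT A =====
def weekly_hr_list : List Int := [168, 336, 504, 672, 840, 1008, 1176, 1344, 1512, 1680, 1848, 2016, 2184, 2352, 2520, 2688,
  2856, 3024, 3192, 3360, 3528, 3696, 3864, 4032, 4200, 4368, 4536, 4704, 4872, 5040, 5208,
  5376, 5544, 5712, 5880, 6048, 6216, 6384, 6552, 6720, 6888, 7056, 7224, 7392, 7560, 7728,
  7896, 8064, 8232, 8400, 8568, 8760]

-- one iteration of the loop body (early 'return i' = state becomes some i and is kept)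
def id_week_step (hour : Int) (acc : Option Int) (i : Int) : Option Int :=
  match acc with
  | some v => some v
  | none =>
    let end_hr := (PySem.List.pyGet? weekly_hr_list i).getD 0   -- index i always in range (0 ≤ i < 52)
    let start_hr := if i = 0 then (0 : Int)
                    else (PySem.List.pyGet? weekly_hr_list (i - 1)).getD 0
    if start_hr ≤ hour ∧ hour < end_hr then some i else none

-- the 'for i in range(52)' loop: foldl over the range, state = the returned value so far
def id_week (hour : Int) : Option Int :=
  (PySem.List.pyRange 0 52 1).foldl (id_week_step hour) none

-- ===== PORT B =====
def id_week_alt (hour : Int) : Option Int :=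
  if 0 ≤ hour ∧ hour < 8760 then some (min (PySem.Int.floordiv hour 168) 51) else none

-- ===== PRECONDITION & SPEC =====
def Spec_id_week (hour : Int) (out : Option Int) : Prop := out = id_week_alt hour
instance (hour : Int) (out : Option Int) : Decidable (Spec_id_week hour out) := by unfold Spec_id_week; infer_instance

-- ===== CLAIM (what is proved, stated in full; the proofs are below) =====
def Claim_equal_id_week : Prop := ∀ (hour : Int), Dom_id_week hour → Spec_id_week hour (id_week hour)

-- ===== LEMMAS AND PROOFS =====

-- a 'some' state is kept to the end of the loop
theorem id_week_step_keeps (hour v : Int) (l : List Int) :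
    l.foldl (id_week_step hour) (some v) = some v := by
  induction l with
  | nil => rfl
  | cons i l ih => simpa [id_week_step] using ih

-- the boundary list, read at a Nat index below 52
theorem weekly_hr_list_get (j : Nat) (h : j < 52) :
    (PySem.List.pyGet? weekly_hr_list (j : Int)).getD 0 =
      if j = 51 then 8760 else 168 * ((j : Int) + 1) := by
  revert h; revert j; decide

-- one loop iteration from state none, at a Nat index, with the bounds evaluated
theorem id_week_step_nat (hour : Int) (j : Nat) (h : j < 52) :
    id_week_step hour none (j : Int) =
      if ((if j = 0 then (0:Int) else 168 * (j : Int)) ≤ hour ∧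
          hour < (if j = 51 then (8760:Int) else 168 * ((j : Int) + 1))) then some (j : Int)
      else none := by
  unfold id_week_step
  cases j with
  | zero => simp [show (PySem.List.pyGet? weekly_hr_list (0:Int)).getD 0 = 168 from by decide]
  | succ n =>
    have h1 : ((n + 1 : Nat) : Int) ≠ 0 := by omega
    have h2 : ((n + 1 : Nat) : Int) - 1 = (n : Nat) := by omega
    have h3 : n ≠ 51 := by omega
    simp only [h1, h2, weekly_hr_list_get n (by omega),
      weekly_hr_list_get (n + 1) h, if_neg h3]
    push_cast
    ring_nf

-- a run of iterations in which no condition fires leaves the state at none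
theorem id_week_skip (hour : Int) : ∀ (n s : Nat),
    (∀ j : Nat, s ≤ j → j < s + n → id_week_step hour none (j : Int) = none) →
    ((List.range' s n).map (fun j : Nat => (j : Int))).foldl (id_week_step hour) none = none := by
  intro n
  induction n with
  | zero => intro s _; rfl
  | succ n ih =>
    intro s h
    rw [List.range'_succ]
    simp only [List.map_cons, List.foldl_cons]
    rw [h s le_rfl (by omega)]
    exact ih (s + 1) (fun j h1 h2 => h j (by omega) (by omega))

-- ===== VERDICT (by name: the statement is the Claim_ definition above) =====
set_option maxHeartbeats 1000000 in
theorem id_week_spec : Claim_equal_id_week := by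
  intro hour _
  unfold Spec_id_week id_week id_week_alt
  rw [show PySem.List.pyRange 0 52 1 = (List.range' 0 52).map (fun j : Nat => (j : Int)) from by decide]
  by_cases hin : 0 ≤ hour ∧ hour < 8760
  · obtain ⟨h0, h1⟩ := hin
    set k : Nat := min (hour.toNat / 168) 51 with hk
    have hk52 : k < 52 := by omega
    have hklo : (168 : Int) * (k : Int) ≤ hour := by omega
    have hkhi : hour < (if k = 51 then (8760:Int) else 168 * ((k : Int) + 1)) := by
      by_cases hc : k = 51 <;> simp [hc] <;> omega
    rw [show List.range' 0 52 = List.range' 0 k ++ List.range' k (52 - k) from by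
        have := List.range'_append (s := 0) (m := k) (n := 52 - k) (step := 1)
        simp at this
        rw [this]; congr 1; omega]
    rw [show List.range' k (52 - k) = k :: List.range' (k + 1) (51 - k) from by
        rw [show 52 - k = (51 - k) + 1 from by omega, List.range'_succ]]
    rw [List.map_append, List.foldl_append]
    rw [id_week_skip hour k 0 (fun j hj1 hj2 => by
        rw [id_week_step_nat hour j (by omega)]
        rw [if_neg]
        rintro ⟨-, hlt⟩
        rw [if_neg (show j ≠ 51 from by omega)] at hlt
        omega)]
    simp only [List.map_cons, List.foldl_cons]
    rw [show id_week_step hour none (k : Int) = some (k : Int) from by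
        rw [id_week_step_nat hour k hk52, if_pos]
        refine ⟨?_, hkhi⟩
        by_cases hc : k = 0 <;> simp [hc] <;> omega]
    rw [id_week_step_keeps]
    rw [if_pos ⟨h0, h1⟩, PySem.Int.floordiv_eq_ediv_of_pos (by norm_num)]
    simp only [Option.some.injEq]
    omega
  · rw [id_week_skip hour 52 0 (fun j hj1 hj2 => by
        rw [id_week_step_nat hour j (by omega)]
        rw [if_neg]
        rintro ⟨hge, hlt⟩
        by_cases hc0 : j = 0 <;> by_cases hc51 : j = 51 <;>
          simp [hc0, hc51] at hge hlt <;> omega)]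
    rw [if_neg hin]
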